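-- pv_equiv track=rewrite | github.com/MiladAlipour98/Blockflow_Net | Blockflow.py | dfs
-- ===== SOURCE A (Python) =====
-- def dfs(adj_list, start, target, path, visited=None):
--     if not visited:
--         visited = set()
--     path.append(start)
--     visited.add(start)
--     if start == target:
--         return path
--     adj_of_start = {node: adj_list[node] for node in adj_list[start]}
--     sorted_by_most_common_adjs = list(sorted(
--         adj_of_start.items(),
--         key=lambda item: len(set(item[1]) & set(adj_list[start])),
--         reverse=True))
--     for neighbour, _ in sorted_by_most_common_adjs:
--
--         if neighbour not in visited:
--             result = dfs(adj_list, neighbour, target, path, visited)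
--             if result is not None:
--                 return result
-- ===== SOURCE B (Python) =====
-- def dfs(adj_list, start, target, path, visited=None):
--     if not visited:
--         visited = set()
--     path.append(start)
--     visited.add(start)
--     if start == target:
--         return path
--     stack = []
--
--     def push_neighbours(node):
--         adj_of_node = {n: adj_list[n] for n in adj_list[node]}
--         ordered = sorted(adj_of_node.items(),
--                          key=lambda item: len(set(item[1]) & set(adj_list[node])),
--                          reverse=True)
--         stack.extend(n for n, _ in reversed(ordered))
--
--     push_neighbours(start)
--     while stack:
--         node = stack.pop()
--         if node in visited:
--             continue
--         path.append(node)
--         visited.add(node)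
--         if node == target:
--             return path
--         push_neighbours(node)
--     return None
-- ===== Notes on version B (the rewrite author's own statement) =====
-- stated objective: alternative
-- what changed: A's recursive DFS is replaced by an iterative loop over an explicit stack of pending nodes (lazy visited check at pop time, same shared-adjacency neighbour ordering and same visit order); equivalence is about the return value, both versions mutate path/visited identically.
-- outside the precondition, e.g. on dfs({0: [1], 1: [2]}, 0, 1, [], None): A returns [0, 1], B returns [0, 1]
import Mathlib
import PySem

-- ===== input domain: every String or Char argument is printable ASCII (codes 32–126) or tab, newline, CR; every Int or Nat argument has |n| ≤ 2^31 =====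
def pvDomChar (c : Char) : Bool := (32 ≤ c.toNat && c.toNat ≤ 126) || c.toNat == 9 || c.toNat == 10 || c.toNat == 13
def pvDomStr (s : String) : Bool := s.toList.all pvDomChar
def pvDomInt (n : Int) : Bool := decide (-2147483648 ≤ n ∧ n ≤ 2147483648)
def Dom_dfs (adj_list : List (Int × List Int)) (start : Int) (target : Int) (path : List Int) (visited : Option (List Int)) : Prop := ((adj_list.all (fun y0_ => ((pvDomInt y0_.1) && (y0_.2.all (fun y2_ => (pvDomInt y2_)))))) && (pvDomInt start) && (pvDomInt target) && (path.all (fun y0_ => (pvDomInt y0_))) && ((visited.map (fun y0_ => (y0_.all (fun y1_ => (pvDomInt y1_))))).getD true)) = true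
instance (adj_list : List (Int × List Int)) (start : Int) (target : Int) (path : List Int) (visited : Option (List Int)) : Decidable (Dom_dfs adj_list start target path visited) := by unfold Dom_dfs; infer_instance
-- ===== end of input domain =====

-- B rewrites A's recursive DFS as an iterative loop over an explicit stack of pending nodes (same
-- visit order, same shared-adjacency neighbour sort); equivalence is about the RETURN value only —
-- both Pythons also mutate `path` and `visited` in place (identically).

-- ===== PORT A =====
-- adj_list[k] (Python dict lookup; missing key = KeyError, excluded by Pre_, here [])
def adjGet (adj : List (Int × List Int)) (k : Int) : List Int :=
  match adj with
  | [] => []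
  | (k', vs) :: rest => if k' = k then vs else adjGet rest k

-- shared by both ports because both Pythons contain the identical two lines:
-- adj_of_node = {n: adj_list[n] for n in adj_list[node]};  sorted(adj_of_node.items(), key=..., reverse=True)
def sortedNbrs (adj : List (Int × List Int)) (node : Int) : List Int :=
  let base := adjGet adj node
  let d := base.foldl (fun d n => d.insert n (adjGet adj n)) (PySem.Dict.empty : PySem.Dict Int (List Int))
  (PySem.List.sorted d.items
      (fun item => ((PySem.Set.inter (PySem.Set.ofList item.2) (PySem.Set.ofList base)).length : Nat))
      true).map Prod.fst

mutual
-- one call of A's recursive dfs; returns (return value, path, visited) to model Python's in-place mutation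
def dfsVisitA (fuel : Nat) (adj : List (Int × List Int)) (target : Int) (start : Int)
    (path : List Int) (visited : PySem.Set Int) : Option (List Int) × List Int × PySem.Set Int :=
  let path1 := path ++ [start]
  let vis1 := PySem.Set.add visited start
  if start = target then (some path1, path1, vis1)
  else dfsLoopA fuel adj target (sortedNbrs adj start) path1 vis1
termination_by (fuel + 1, 0)

-- A's 'for neighbour, _ in sorted_by_most_common_adjs' loop (fuel only pays for recursive calls;
-- it never runs out under Pre_, see the proofs)
def dfsLoopA (fuel : Nat) (adj : List (Int × List Int)) (target : Int) (ns : List Int)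
    (path : List Int) (visited : PySem.Set Int) : Option (List Int) × List Int × PySem.Set Int :=
  match ns with
  | [] => (none, path, visited)
  | n :: rest =>
    if PySem.Set.contains visited n then dfsLoopA fuel adj target rest path visited
    else
      match fuel with
      | 0 => (none, path, visited)
      | f + 1 =>
        match dfsVisitA f adj target n path visited with
        | (some r, p, v) => (some r, p, v)
        | (none, p, v) => dfsLoopA (f + 1) adj target rest p v
termination_by (fuel, ns.length + 1)
end

def dfs (adj_list : List (Int × List Int)) (start : Int) (target : Int) (path : List Int) (visited : Option (List Int)) : Option (List Int) :=
  -- 'if not visited: visited = set()': None and [] both give the empty set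
  let vis0 : PySem.Set Int := PySem.Set.ofList (visited.getD [])
  (dfsVisitA adj_list.length adj_list target start path vis0).1

-- ===== PORT B =====
-- B's 'while stack' loop; head of the list = top of the stack, so Python's
-- stack.extend(reversed(ordered-neighbours)) followed by pops is 'sortedNbrs ++ rest' here
def dfsLoopB (fuel : Nat) (adj : List (Int × List Int)) (target : Int) (stack : List Int)
    (path : List Int) (visited : PySem.Set Int) : Option (List Int) :=
  match stack with
  | [] => none
  | n :: rest =>
    match fuel with
    | 0 => none
    | f + 1 =>
      if PySem.Set.contains visited n then dfsLoopB f adj target rest path visited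
      else
        let path1 := path ++ [n]
        let vis1 := PySem.Set.add visited n
        if n = target then some path1
        else dfsLoopB f adj target (sortedNbrs adj n ++ rest) path1 vis1

def dfs_alt (adj_list : List (Int × List Int)) (start : Int) (target : Int) (path : List Int) (visited : Option (List Int)) : Option (List Int) :=
  let vis0 : PySem.Set Int := PySem.Set.ofList (visited.getD [])
  let path1 := path ++ [start]
  let vis1 := PySem.Set.add vis0 start
  if start = target then some path1
  else
    -- fuel = total adjacency size: bounds the number of loop iterations (proved sufficient under Pre_)
    dfsLoopB ((adj_list.map (fun p => p.2.length)).sum) adj_list target (sortedNbrs adj_list start) path1 vis1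

-- ===== PRECONDITION & SPEC =====
-- Pre_ excludes (a) association lists with duplicate keys, which no Python dict argument can produce,
-- and (b) inputs (unless start == target) where start is not a key or some adjacency value is not a
-- key: on those A raises KeyError whenever the traversal reaches the missing key, and whether it does
-- depends on the traversal, so all of them are excluded.
def Pre_dfs (adj_list : List (Int × List Int)) (start : Int) (target : Int) (path : List Int) (visited : Option (List Int)) : Prop :=
  (adj_list.map Prod.fst).Nodup ∧
  (start = target ∨
    (start ∈ adj_list.map Prod.fst ∧ ∀ p ∈ adj_list, ∀ v ∈ p.2, v ∈ adj_list.map Prod.fst))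
instance (adj_list : List (Int × List Int)) (start : Int) (target : Int) (path : List Int) (visited : Option (List Int)) : Decidable (Pre_dfs adj_list start target path visited) := by unfold Pre_dfs; infer_instance

def pvWitness_dfs : (List (Int × List Int)) × Int × Int × List Int × Option (List Int) :=
  ([(0, [1, 2]), (1, [2]), (2, [0])], 0, 2, [], none)

def Spec_dfs (adj_list : List (Int × List Int)) (start : Int) (target : Int) (path : List Int) (visited : Option (List Int)) (out : Option (List Int)) : Prop := out = dfs_alt adj_list start target path visited
instance (adj_list : List (Int × List Int)) (start : Int) (target : Int) (path : List Int) (visited : Option (List Int)) (out : Option (List Int)) : Decidable (Spec_dfs adj_list start target path visited out) := by unfold Spec_dfs; infer_instance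

-- ===== CLAIM (what is proved, stated in full; the proofs are below) =====
def Claim_equal_dfs : Prop := ∀ (adj_list : List (Int × List Int)) (start : Int) (target : Int) (path : List Int) (visited : Option (List Int)), Dom_dfs adj_list start target path visited → Pre_dfs adj_list start target path visited → Spec_dfs adj_list start target path visited (dfs adj_list start target path visited)

-- ===== LEMMAS AND PROOFS =====

-- number of adjacency entries whose key is still unvisited (A's fuel measure)
def unvisA (adj : List (Int × List Int)) (v : PySem.Set Int) : Nat :=
  (adj.filter (fun p => !(PySem.Set.contains v p.1))).length

-- stack length plus total adjacency size of unvisited keys (B's fuel measure)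
def costB (adj : List (Int × List Int)) (v : PySem.Set Int) (stack : List Int) : Nat :=
  stack.length + ((adj.filter (fun p => !(PySem.Set.contains v p.1))).map (fun p => p.2.length)).sum

theorem sortedNbrs_length_le (adj : List (Int × List Int)) (node : Int) :
    (sortedNbrs adj node).length ≤ (adjGet adj node).length := by
  unfold sortedNbrs
  simp only [List.length_map, PySem.List.length_sorted]
  have h : (((adjGet adj node).foldl (fun d n => d.insert n (adjGet adj n))
      (PySem.Dict.empty : PySem.Dict Int (List Int))).keys).length ≤ (adjGet adj node).length := by
    rw [PySem.Dict.keys_foldl_insert]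
    have : (PySem.Dict.empty : PySem.Dict Int (List Int)).keys = [] := rfl
    rw [this, PySem.Set.update_nil_left]
    exact PySem.Set.length_ofList_le _
  simpa [PySem.Dict.keys, List.length_map] using h

theorem sortedNbrs_subset (adj : List (Int × List Int)) (node : Int) :
    ∀ x ∈ sortedNbrs adj node, x ∈ adjGet adj node := by
  intro x hx
  unfold sortedNbrs at hx
  simp only [List.mem_map] at hx
  obtain ⟨item, hitem, rfl⟩ := hx
  rw [PySem.List.mem_sorted] at hitem
  have hk : item.1 ∈ (((adjGet adj node).foldl (fun d n => d.insert n (adjGet adj n))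
      (PySem.Dict.empty : PySem.Dict Int (List Int))).keys) := by
    simp only [PySem.Dict.keys, List.mem_map]
    exact ⟨item, hitem, rfl⟩
  rw [PySem.Dict.keys_foldl_insert] at hk
  have : (PySem.Dict.empty : PySem.Dict Int (List Int)).keys = [] := rfl
  rw [this, PySem.Set.update_nil_left, PySem.Set.mem_ofList] at hk
  exact hk

theorem adjGet_subset_values (adj : List (Int × List Int)) (k : Int) :
    ∀ x ∈ adjGet adj k, ∃ p ∈ adj, x ∈ p.2 := by
  induction adj with
  | nil => intro x hx; simp [adjGet] at hx
  | cons hd tl ih =>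
    intro x hx
    obtain ⟨k', vs⟩ := hd
    simp only [adjGet] at hx
    by_cases h : k' = k
    · rw [if_pos h] at hx
      exact ⟨(k', vs), List.mem_cons_self, hx⟩
    · rw [if_neg h] at hx
      obtain ⟨p, hp, hxp⟩ := ih x hx
      exact ⟨p, List.mem_cons_of_mem _ hp, hxp⟩

-- Bool form of membership in an added set
theorem contains_add_iff (v : PySem.Set Int) (n x : Int) :
    PySem.Set.contains (PySem.Set.add v n) x = true ↔ x ∈ v ∨ x = n := by
  rw [PySem.Set.contains_iff, PySem.Set.mem_add]

theorem filt_sublist (adj : List (Int × List Int)) (v w : PySem.Set Int)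
    (h : ∀ x ∈ v, x ∈ w) :
    (adj.filter (fun p => !(PySem.Set.contains w p.1))).Sublist
      (adj.filter (fun p => !(PySem.Set.contains v p.1))) := by
  apply List.monotone_filter_right
  intro a ha
  simp only [Bool.not_eq_true'] at ha ⊢
  rw [← Bool.not_eq_true] at ha ⊢
  intro hv
  exact ha ((PySem.Set.contains_iff w a.1).2 (h a.1 ((PySem.Set.contains_iff v a.1).1 hv)))

theorem unvisA_mono (adj : List (Int × List Int)) (v w : PySem.Set Int)
    (h : ∀ x ∈ v, x ∈ w) : unvisA adj w ≤ unvisA adj v :=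
  (filt_sublist adj v w h).length_le

theorem costB_mono (adj : List (Int × List Int)) (v w : PySem.Set Int) (s t : List Int)
    (h : ∀ x ∈ v, x ∈ w) (hlen : s.length ≤ t.length) :
    costB adj w s ≤ costB adj v t := by
  unfold costB
  have := ((filt_sublist adj v w h).map (fun p => p.2.length)).sum_le_sum (by intro a _; omega)
  omega

-- if n is not a key, adding it to visited does not change the unvisited filter
theorem filter_add_not_key (adj : List (Int × List Int)) (v : PySem.Set Int) (n : Int)
    (h : n ∉ adj.map Prod.fst) :
    adj.filter (fun p => !(PySem.Set.contains (PySem.Set.add v n) p.1)) =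
      adj.filter (fun p => !(PySem.Set.contains v p.1)) := by
  apply List.filter_congr
  intro p hp
  have hne : p.1 ≠ n := by
    intro he; exact h (List.mem_map.2 ⟨p, hp, he⟩)
  rw [Bool.eq_iff_iff]
  simp only [Bool.not_eq_true', ← Bool.not_eq_true]
  constructor
  · intro ha hv
    exact ha ((contains_add_iff v n p.1).2 (Or.inl ((PySem.Set.contains_iff v p.1).1 hv)))
  · intro ha hv
    rcases (contains_add_iff v n p.1).1 hv with hm | he
    · exact ha ((PySem.Set.contains_iff v p.1).2 hm)
    · exact hne he

-- splitting off the entry of a fresh key n (unique by Nodup)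
theorem split_sum (adj : List (Int × List Int)) (v : PySem.Set Int) (n : Int)
    (hnd : (adj.map Prod.fst).Nodup) (hmem : n ∈ adj.map Prod.fst) (hnv : n ∉ v) :
    ((adj.filter (fun p => !(PySem.Set.contains v p.1))).map (fun p => p.2.length)).sum =
      (adjGet adj n).length +
        ((adj.filter (fun p => !(PySem.Set.contains (PySem.Set.add v n) p.1))).map
          (fun p => p.2.length)).sum := by
  induction adj with
  | nil => simp at hmem
  | cons hd tl ih =>
    obtain ⟨k, vs⟩ := hd
    simp only [List.map_cons, List.nodup_cons] at hnd
    by_cases hk : k = n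
    · subst hk
      have hrest : tl.filter (fun p => !(PySem.Set.contains (PySem.Set.add v k) p.1)) =
          tl.filter (fun p => !(PySem.Set.contains v p.1)) :=
        filter_add_not_key tl v k hnd.1
      rw [List.filter_cons_of_pos (by simp [hnv]),
        List.filter_cons_of_neg (by simp [PySem.Set.mem_add]), hrest]
      simp [adjGet]
    · have hmem' : n ∈ tl.map Prod.fst := by
        rcases List.mem_cons.1 hmem with he | h
        · exact absurd he.symm hk
        · exact h
      have hadj : adjGet ((k, vs) :: tl) n = adjGet tl n := by
        simp [adjGet, hk]
      rw [hadj]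
      by_cases hck : k ∈ v
      · rw [List.filter_cons_of_neg (by simp [hck]),
          List.filter_cons_of_neg (by simp [PySem.Set.mem_add, hck])]
        exact ih hnd.2 hmem'
      · rw [List.filter_cons_of_pos (by simp [hck]),
          List.filter_cons_of_pos (by simp [PySem.Set.mem_add, hck, hk])]
        simp only [List.map_cons, List.sum_cons]
        have := ih hnd.2 hmem'
        omega

theorem split_unvis (adj : List (Int × List Int)) (v : PySem.Set Int) (n : Int)
    (hnd : (adj.map Prod.fst).Nodup) (hmem : n ∈ adj.map Prod.fst) (hnv : n ∉ v) :
    unvisA adj v = 1 + unvisA adj (PySem.Set.add v n) := by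
  unfold unvisA
  induction adj with
  | nil => simp at hmem
  | cons hd tl ih =>
    obtain ⟨k, vs⟩ := hd
    simp only [List.map_cons, List.nodup_cons] at hnd
    by_cases hk : k = n
    · subst hk
      have hrest : tl.filter (fun p => !(PySem.Set.contains (PySem.Set.add v k) p.1)) =
          tl.filter (fun p => !(PySem.Set.contains v p.1)) :=
        filter_add_not_key tl v k hnd.1
      rw [List.filter_cons_of_pos (by simp [hnv]),
        List.filter_cons_of_neg (by simp [PySem.Set.mem_add]), hrest]
      simp only [List.length_cons]
      omega
    · have hmem' : n ∈ tl.map Prod.fst := by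
        rcases List.mem_cons.1 hmem with he | h
        · exact absurd he.symm hk
        · exact h
      by_cases hck : k ∈ v
      · rw [List.filter_cons_of_neg (by simp [hck]),
          List.filter_cons_of_neg (by simp [PySem.Set.mem_add, hck])]
        exact ih hnd.2 hmem'
      · rw [List.filter_cons_of_pos (by simp [hck]),
          List.filter_cons_of_pos (by simp [PySem.Set.mem_add, hck, hk])]
        simp only [List.length_cons]
        have := ih hnd.2 hmem'
        omega

-- convenient arithmetic forms
theorem costB_cons (adj : List (Int × List Int)) (v : PySem.Set Int) (n : Int) (s : List Int) :
    costB adj v (n :: s) = costB adj v s + 1 := by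
  simp only [costB, List.length_cons]; omega

theorem sortedNbrs_keys (adj : List (Int × List Int))
    (hcl : ∀ p ∈ adj, ∀ y ∈ p.2, y ∈ adj.map Prod.fst) (n : Int) :
    ∀ x ∈ sortedNbrs adj n, x ∈ adj.map Prod.fst := by
  intro x hx
  obtain ⟨p, hp, hxp⟩ := adjGet_subset_values adj n x (sortedNbrs_subset adj n x hx)
  exact hcl p hp x hxp

theorem cost_step (adj : List (Int × List Int)) (v : PySem.Set Int) (n : Int) (rest : List Int)
    (hnd : (adj.map Prod.fst).Nodup) (hmem : n ∈ adj.map Prod.fst) (hnv : n ∉ v) :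
    costB adj (PySem.Set.add v n) (sortedNbrs adj n ++ rest) + 1 ≤ costB adj v (n :: rest) := by
  have h1 := sortedNbrs_length_le adj n
  have h2 := split_sum adj v n hnd hmem hnv
  simp only [costB, List.length_append, List.length_cons]
  omega

-- A's loop only ever grows the visited set
theorem loopA_vis_mono (adj : List (Int × List Int)) (target : Int) :
    ∀ (fuel : Nat) (ns path : List Int) (v : PySem.Set Int) (x : Int),
      x ∈ v → x ∈ (dfsLoopA fuel adj target ns path v).2.2 := by
  intro fuel
  induction fuel with
  | zero =>
    intro ns
    induction ns with
    | nil => intro path v x hx; rw [dfsLoopA]; exact hx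
    | cons n rest ih =>
      intro path v x hx
      rw [dfsLoopA]
      by_cases hc : PySem.Set.contains v n = true
      · rw [if_pos hc]; exact ih path v x hx
      · rw [if_neg hc]; exact hx
  | succ f ihf =>
    intro ns
    induction ns with
    | nil => intro path v x hx; rw [dfsLoopA]; exact hx
    | cons n rest ih =>
      intro path v x hx
      rw [dfsLoopA]
      by_cases hc : PySem.Set.contains v n = true
      · rw [if_pos hc]; exact ih path v x hx
      · rw [if_neg hc]
        have hv : ∀ y ∈ v, y ∈ (dfsVisitA f adj target n path v).2.2 := by
          intro y hy
          rw [dfsVisitA]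
          by_cases ht : n = target
          · simp only [if_pos ht]
            exact (PySem.Set.mem_add v n y).2 (Or.inl hy)
          · simp only [if_neg ht]
            exact ihf _ _ _ y ((PySem.Set.mem_add v n y).2 (Or.inl hy))
        rcases h : dfsVisitA f adj target n path v with ⟨r, p, w⟩
        have hxw : x ∈ w := by have := hv x hx; rw [h] at this; exact this
        cases r with
        | some r0 => exact hxw
        | none => exact ih p w x hxw

-- the result of B's loop does not depend on the fuel, once the fuel covers the cost
theorem loopB_irrel (adj : List (Int × List Int)) (target : Int)
    (hnd : (adj.map Prod.fst).Nodup)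
    (hcl : ∀ p ∈ adj, ∀ y ∈ p.2, y ∈ adj.map Prod.fst) :
    ∀ (f g : Nat) (stack path : List Int) (v : PySem.Set Int),
      (∀ n ∈ stack, n ∈ adj.map Prod.fst) →
      costB adj v stack ≤ f → costB adj v stack ≤ g →
      dfsLoopB f adj target stack path v = dfsLoopB g adj target stack path v := by
  intro f
  induction f with
  | zero =>
    intro g stack path v _ hf _
    cases stack with
    | nil => rw [dfsLoopB, dfsLoopB]
    | cons n rest => rw [costB_cons] at hf; omega
  | succ f ihf =>
    intro g stack path v hkeys hf hg
    cases stack with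
    | nil => rw [dfsLoopB, dfsLoopB]
    | cons n rest =>
      cases g with
      | zero => rw [costB_cons] at hg; omega
      | succ g' =>
        rw [dfsLoopB, dfsLoopB]
        by_cases hc : PySem.Set.contains v n = true
        · rw [if_pos hc, if_pos hc]
          rw [costB_cons] at hf hg
          exact ihf g' rest path v (fun m hm => hkeys m (List.mem_cons_of_mem _ hm))
            (by omega) (by omega)
        · rw [if_neg hc, if_neg hc]
          by_cases ht : n = target
          · rw [if_pos ht, if_pos ht]
          · rw [if_neg ht, if_neg ht]
            have hnv : n ∉ v := fun h => hc ((PySem.Set.contains_iff v n).2 h)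
            have hmem : n ∈ adj.map Prod.fst := hkeys n List.mem_cons_self
            have hstep := cost_step adj v n rest hnd hmem hnv
            apply ihf g'
            · intro m hm
              rcases List.mem_append.1 hm with h1 | h2
              · exact sortedNbrs_keys adj hcl n m h1
              · exact hkeys m (List.mem_cons_of_mem _ h2)
            · omega
            · omega

-- continuation form of B's loop used by the simulation lemma
def contB (fB : Nat) (adj : List (Int × List Int)) (target : Int) (stack : List Int)
    (res : Option (List Int) × List Int × PySem.Set Int) : Option (List Int) :=
  match res with
  | (some r, _, _) => some r
  | (none, p, w) => dfsLoopB fB adj target stack p w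

-- MAIN SIMULATION: B's stack loop, run on ns ++ stack, equals A's neighbour loop on ns
-- followed by B's loop on the remaining stack (with A's final path and visited set)
theorem simAB (adj : List (Int × List Int)) (target : Int)
    (hnd : (adj.map Prod.fst).Nodup)
    (hcl : ∀ p ∈ adj, ∀ y ∈ p.2, y ∈ adj.map Prod.fst) :
    ∀ (fA : Nat) (ns stack path : List Int) (v : PySem.Set Int) (fB : Nat),
      (∀ n ∈ ns, n ∈ adj.map Prod.fst) → (∀ n ∈ stack, n ∈ adj.map Prod.fst) →
      unvisA adj v ≤ fA → costB adj v (ns ++ stack) ≤ fB →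
      dfsLoopB fB adj target (ns ++ stack) path v =
        contB fB adj target stack (dfsLoopA fA adj target ns path v) := by
  intro fA
  induction fA with
  | zero =>
    intro ns
    induction ns with
    | nil =>
      intro stack path v fB _ _ _ _
      rw [List.nil_append, dfsLoopA, contB]
    | cons n rest ih =>
      intro stack path v fB hns hstk hA hB
      by_cases hc : PySem.Set.contains v n = true
      · rw [List.cons_append, costB_cons] at hB
        obtain ⟨fB', rfl⟩ : ∃ k, fB = k + 1 := ⟨fB - 1, by omega⟩
        rw [List.cons_append, dfsLoopB, if_pos hc, dfsLoopA, if_pos hc]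
        rw [loopB_irrel adj target hnd hcl fB' (fB' + 1) (rest ++ stack) path v
          (by intro m hm; rcases List.mem_append.1 hm with h1 | h2
              · exact hns m (List.mem_cons_of_mem _ h1)
              · exact hstk m h2)
          (by omega) (by omega)]
        exact ih stack path v (fB' + 1) (fun m hm => hns m (List.mem_cons_of_mem _ hm)) hstk hA
          (by omega)
      · exfalso
        have hnv : n ∉ v := fun h => hc ((PySem.Set.contains_iff v n).2 h)
        have := split_unvis adj v n hnd (hns n List.mem_cons_self) hnv
        omega
  | succ fA' ihf =>
    intro ns
    induction ns with
    | nil =>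
      intro stack path v fB _ _ _ _
      rw [List.nil_append, dfsLoopA, contB]
    | cons n rest ih =>
      intro stack path v fB hns hstk hA hB
      have hB' := hB
      rw [List.cons_append, costB_cons] at hB'
      obtain ⟨g, rfl⟩ : ∃ k, fB = k + 1 := ⟨fB - 1, by omega⟩
      by_cases hc : PySem.Set.contains v n = true
      · rw [List.cons_append, dfsLoopB, if_pos hc, dfsLoopA, if_pos hc]
        rw [loopB_irrel adj target hnd hcl g (g + 1) (rest ++ stack) path v
          (by intro m hm; rcases List.mem_append.1 hm with h1 | h2
              · exact hns m (List.mem_cons_of_mem _ h1)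
              · exact hstk m h2)
          (by omega) (by omega)]
        exact ih stack path v (g + 1) (fun m hm => hns m (List.mem_cons_of_mem _ hm)) hstk hA
          (by omega)
      · have hnv : n ∉ v := fun h => hc ((PySem.Set.contains_iff v n).2 h)
        have hmem : n ∈ adj.map Prod.fst := hns n List.mem_cons_self
        rw [List.cons_append, dfsLoopB, if_neg hc]
        have hred : dfsLoopA (fA' + 1) adj target (n :: rest) path v =
            (match dfsVisitA fA' adj target n path v with
             | (some r, p, w) => (some r, p, w)
             | (none, p, w) => dfsLoopA (fA' + 1) adj target rest p w) := by
          rw [dfsLoopA, if_neg hc]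
        by_cases ht : n = target
        · rw [hred, dfsVisitA, if_pos ht]
          simp only [if_pos ht, contB]
        · have hred2 : dfsVisitA fA' adj target n path v =
              dfsLoopA fA' adj target (sortedNbrs adj n) (path ++ [n]) (v.add n) := by
            rw [dfsVisitA, if_neg ht]
          simp only [if_neg ht]
          have hA1 : unvisA adj (v.add n) ≤ fA' := by
            have := split_unvis adj v n hnd hmem hnv
            omega
          have hcost1 : costB adj (v.add n) (sortedNbrs adj n ++ (rest ++ stack)) ≤ g := by
            have h1 := cost_step adj v n (rest ++ stack) hnd hmem hnv
            have h2 := costB_cons adj v n (rest ++ stack)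
            omega
          have hrs : ∀ m ∈ rest ++ stack, m ∈ adj.map Prod.fst := by
            intro m hm
            rcases List.mem_append.1 hm with h1 | h2
            · exact hns m (List.mem_cons_of_mem _ h1)
            · exact hstk m h2
          have hmain := ihf (sortedNbrs adj n) (rest ++ stack) (path ++ [n]) (v.add n) g
            (sortedNbrs_keys adj hcl n) hrs hA1 hcost1
          rw [hmain, hred, hred2]
          rcases hres : dfsLoopA fA' adj target (sortedNbrs adj n) (path ++ [n]) (v.add n)
            with ⟨r, p, w⟩
          cases r with
          | some r0 => simp only [contB]
          | none =>
            simp only [contB]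
            have hwmono : ∀ x ∈ v.add n, x ∈ w := by
              intro x hx
              have := loopA_vis_mono adj target fA' (sortedNbrs adj n) (path ++ [n]) (v.add n) x hx
              rw [hres] at this
              exact this
            have hcw : costB adj w (rest ++ stack) ≤ g := by
              refine le_trans (costB_mono adj (v.add n) w (rest ++ stack)
                (sortedNbrs adj n ++ (rest ++ stack)) hwmono ?_) hcost1
              simp only [List.length_append]
              omega
            rw [loopB_irrel adj target hnd hcl g (g + 1) (rest ++ stack) p w hrs hcw (by omega)]
            have hAw : unvisA adj w ≤ fA' + 1 := by
              have h1 := unvisA_mono adj (v.add n) w hwmono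
              omega
            exact ih stack p w (g + 1) (fun m hm => hns m (List.mem_cons_of_mem _ hm)) hstk hAw
              (by omega)


theorem unvisA_le (adj : List (Int × List Int)) (v : PySem.Set Int) :
    unvisA adj v ≤ adj.length := List.length_filter_le _ _

theorem dfs_spec : Claim_equal_dfs := by
  intro adj start target path visited _hdom hpre
  unfold Spec_dfs
  obtain ⟨hnd, hcase⟩ := hpre
  by_cases ht : start = target
  · simp [dfs, dfs_alt, dfsVisitA, ht]
  · rcases hcase with he | ⟨hkey, hcl⟩
    · exact absurd he ht
    · simp only [dfs, dfs_alt, if_neg ht]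
      rw [dfsVisitA, if_neg ht]
      have hstart1 : start ∈ (PySem.Set.ofList (visited.getD [])).add start :=
        (PySem.Set.mem_add _ _ _).2 (Or.inr rfl)
      have hcost : costB adj ((PySem.Set.ofList (visited.getD [])).add start)
          (sortedNbrs adj start ++ ([] : List Int)) ≤ (adj.map (fun p => p.2.length)).sum := by
        rw [List.append_nil]
        have h1 := sortedNbrs_length_le adj start
        have hsub : ∀ x ∈ PySem.Set.add ([] : PySem.Set Int) start,
            x ∈ (PySem.Set.ofList (visited.getD [])).add start := by
          intro x hx
          rcases (PySem.Set.mem_add _ _ _).1 hx with h | h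
          · cases h
          · exact h ▸ hstart1
        have h2 := ((filt_sublist adj (PySem.Set.add ([] : PySem.Set Int) start)
            ((PySem.Set.ofList (visited.getD [])).add start) hsub).map
            (fun p => p.2.length)).sum_le_sum (by intro a _; omega)
        have h3 := split_sum adj ([] : PySem.Set Int) start hnd hkey (by simp)
        have h4 : adj.filter (fun p => !(PySem.Set.contains ([] : PySem.Set Int) p.1)) = adj := by
          apply List.filter_eq_self.2
          intro a _
          simp [PySem.Set.contains]
        rw [h4] at h3
        simp only [costB]
        omega
      have h := simAB adj target hnd hcl adj.length (sortedNbrs adj start) [] (path ++ [start])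
        ((PySem.Set.ofList (visited.getD [])).add start) ((adj.map (fun p => p.2.length)).sum)
        (sortedNbrs_keys adj hcl start) (by intro m hm; cases hm) (unvisA_le adj _) hcost
      rw [List.append_nil] at h
      rw [h]
      rcases hres : dfsLoopA adj.length adj target (sortedNbrs adj start) (path ++ [start])
        ((PySem.Set.ofList (visited.getD [])).add start) with ⟨r, p, w⟩
      cases r with
      | some r0 => simp [contB]
      | none => simp [contB, dfsLoopB]
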